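-- pv_equiv track=rewrite | github.com/aurorazl/math | StringMath/3.回文.py | Manacher2
-- ===== SOURCE A (Python) =====
-- def Manacher2(s):
--     n = len(s)
--     p = [1 for i in range(n)]
--     id = 0
--     mx = 1
--     for i in range(1,n):
--         if mx>i:
--             if p[2*id-i] != mx-i:           # 无论是p[2*id-i]大于（mx右侧部分和i-mx左侧已经不相等了，不用再扩展了），小于就再范围内，不用扩展
--                 p[i] = min(p[2*id-i],mx-i)  # 对于超出部分，如果p[2*id-i]大于mx-i，经验证明p[i]=mx-i
--             else:
--                 p[i]=p[2*id-i]
--                 while i - p[i] >= 0 and i + p[i] < n and s[i + p[i]] == s[i - p[i]]:  # P[i] ≥P[j]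
--                     p[i] += 1
--         else:
--             p[i]=1
--             while i-p[i]>=0 and i+p[i]<n and  s[i+p[i]] == s[i-p[i]]:   # 对于已经超出mx的i，循环判断左右值是否相等
--                 p[i] += 1
--         if mx<i+p[i]:
--             mx = i+p[i]
--             id = i
--     return p
-- ===== SOURCE B (Python) =====
-- def Manacher2(s):
--     n = len(s)
--     res = []
--     for i in range(n):
--         r = 1
--         for a, b in zip(s[:i][::-1], s[i+1:]):
--             if a != b:
--                 break
--             r += 1
--         res.append(r)
--     return res
-- ===== Notes on version B (the rewrite author's own statement) =====
-- stated objective: simpler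
-- what changed: Replaced Manacher's mirror/rightmost-boundary bookkeeping (id/mx, mirror-radius reuse, three branches, in-place array updates) by an independent per-center longest-common-prefix scan: for each i the radius is 1 plus the number of leading equal pairs of the reversed left part s[:i][::-1] zipped with the right part s[i+1:], which provably yields the identical array.
import Mathlib
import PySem

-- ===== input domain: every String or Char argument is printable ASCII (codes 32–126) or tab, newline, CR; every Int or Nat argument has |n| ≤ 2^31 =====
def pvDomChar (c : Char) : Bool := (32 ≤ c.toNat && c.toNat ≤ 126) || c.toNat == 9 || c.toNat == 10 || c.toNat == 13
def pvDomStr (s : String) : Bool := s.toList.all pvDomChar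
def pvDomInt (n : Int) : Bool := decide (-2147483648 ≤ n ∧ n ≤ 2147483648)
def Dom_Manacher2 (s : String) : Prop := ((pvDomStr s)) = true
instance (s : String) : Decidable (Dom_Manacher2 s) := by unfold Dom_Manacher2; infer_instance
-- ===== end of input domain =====

-- B replaces Manacher's id/mx mirror bookkeeping and expansion loops by an independent
-- per-center longest-common-prefix scan of reversed-left vs right (simpler, same value; proved equal).

-- ===== PORT A =====

-- A's while-loop test `i-p>=0 and i+p<n and s[i+p]==s[i-p]`:
def pvMatch (l : List Char) (i k : Nat) : Bool :=
  decide (k ≤ i) && decide (i + k < l.length) && (l.getD (i + k) ' ' == l.getD (i - k) ' ')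

-- A's `while …: p[i] += 1` loop, as structural recursion on the remaining room to the right.
def pvExpand (l : List Char) (i k : Nat) : Nat :=
  if h : pvMatch l i k = true then pvExpand l i (k + 1) else k
termination_by l.length + 1 - (i + k)
decreasing_by
  simp only [pvMatch, Bool.and_eq_true, decide_eq_true_eq] at h
  omega

-- one iteration of A's `for i in range(1,n)` loop; state = (p, id, mx)
def pvStepA (l : List Char) (st : List Nat × Nat × Nat) (i : Nat) : List Nat × Nat × Nat :=
  let p := st.1
  let id := st.2.1
  let mx := st.2.2
  let p :=
    if mx > i then
      if p.getD (2 * id - i) 0 ≠ mx - i then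
        p.set i (min (p.getD (2 * id - i) 0) (mx - i))
      else
        p.set i (pvExpand l i (p.getD (2 * id - i) 0))
    else
      p.set i (pvExpand l i 1)
  if mx < i + p.getD i 0 then (p, i, i + p.getD i 0) else (p, id, mx)

def Manacher2 (s : String) : List Int :=
  let l := s.toList
  let n := l.length
  let st := (List.range' 1 (n - 1)).foldl (pvStepA l) (List.replicate n 1, 0, 1)
  st.1.map Int.ofNat

-- ===== PORT B =====

-- Source B's inner `for a, b in zip(…): if a != b: break; r += 1` loop: the number of
-- leading positions where the two lists agree.
def pvCpl : List Char → List Char → Nat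
  | a :: as, b :: bs => if a = b then pvCpl as bs + 1 else 0
  | _, _ => 0

def Manacher2_alt (s : String) : List Int :=
  let l := s.toList
  (List.range l.length).map (fun i =>
    Int.ofNat (1 + pvCpl (l.take i).reverse (l.drop (i + 1))))

-- ===== PRECONDITION & SPEC =====
def Spec_Manacher2 (s : String) (out : List Int) : Prop := out = Manacher2_alt s
instance (s : String) (out : List Int) : Decidable (Spec_Manacher2 s out) := by unfold Spec_Manacher2; infer_instance

-- ===== CLAIM (what is proved, stated in full; the proofs are below) =====
def Claim_equal_Manacher2 : Prop := ∀ (s : String), Dom_Manacher2 s → Spec_Manacher2 s (Manacher2 s)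

-- ===== LEMMAS AND PROOFS =====

lemma expand_ge (l : List Char) (i k : Nat) : k ≤ pvExpand l i k := by
  rw [pvExpand]
  split
  · exact le_trans (Nat.le_succ k) (expand_ge l i (k+1))
  · exact le_refl k
termination_by l.length + 1 - (i + k)
decreasing_by
  rename_i h; simp only [pvMatch, Bool.and_eq_true, decide_eq_true_eq] at h; omega

lemma expand_not_match (l : List Char) (i k : Nat) : pvMatch l i (pvExpand l i k) = false := by
  rw [pvExpand]
  split
  · exact expand_not_match l i (k+1)
  · rename_i h; exact Bool.not_eq_true _ ▸ (by simpa using h)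
termination_by l.length + 1 - (i + k)
decreasing_by
  simp only [pvMatch, Bool.and_eq_true, decide_eq_true_eq] at *
  omega

lemma expand_match_below (l : List Char) (i k t : Nat) (hk : k ≤ t) (ht : t < pvExpand l i k) :
    pvMatch l i t = true := by
  rw [pvExpand] at ht
  split at ht
  · rename_i h
    rcases Nat.eq_or_lt_of_le hk with rfl | hk'
    · exact h
    · exact expand_match_below l i (k+1) t hk' ht
  · omega
termination_by l.length + 1 - (i + k)
decreasing_by
  simp only [pvMatch, Bool.and_eq_true, decide_eq_true_eq] at *
  omega

lemma expand_congr (l : List Char) (i : Nat) (d k : Nat)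
    (h : ∀ t, k ≤ t → t < k + d → pvMatch l i t = true) :
    pvExpand l i k = pvExpand l i (k + d) := by
  induction d generalizing k with
  | zero => rfl
  | succ d ih =>
    have hm : pvMatch l i k = true := h k (le_refl k) (by omega)
    rw [pvExpand, dif_pos hm]
    have : k + (d + 1) = (k + 1) + d := by omega
    rw [this]
    exact ih (k+1) (fun t h1 h2 => h t (by omega) (by omega))

-- basic bounds on the radius R i := pvExpand l i 1
lemma R_pal (l : List Char) (i t : Nat) (h1 : 1 ≤ t) (h2 : t < pvExpand l i 1) :
    t ≤ i ∧ i + t < l.length ∧ l.getD (i + t) ' ' = l.getD (i - t) ' ' := by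
  have h := expand_match_below l i 1 t h1 h2
  simp only [pvMatch, Bool.and_eq_true, decide_eq_true_eq, beq_iff_eq] at h
  exact ⟨h.1.1, h.1.2, h.2⟩

lemma R_le_succ (l : List Char) (i : Nat) : pvExpand l i 1 ≤ i + 1 := by
  have h1 := expand_ge l i 1
  by_cases h : pvExpand l i 1 = 1
  · omega
  · have := R_pal l i (pvExpand l i 1 - 1) (by omega) (by omega)
    omega

lemma R_zero (l : List Char) : pvExpand l 0 1 = 1 := by
  rw [pvExpand]
  simp [pvMatch]

-- the invariant A's loop maintains before iteration i
def pvInv (l : List Char) (i : Nat) (st : List Nat × Nat × Nat) : Prop :=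
  st.1.length = l.length ∧
  (∀ j, j < i → st.1.getD j 0 = pvExpand l j 1) ∧
  st.2.1 < i ∧
  st.2.2 = st.2.1 + pvExpand l st.2.1 1

-- reflecting a point a right of the center id to 2*id - a inside id's palindrome
lemma refl1 (l : List Char) (id a : Nat) (ha : id < a) (hb : a < id + pvExpand l id 1) :
    l.getD a ' ' = l.getD (2 * id - a) ' ' := by
  have hp := R_pal l id (a - id) (by omega) (by omega)
  have e1 : id + (a - id) = a := by omega
  have e2 : id - (a - id) = 2 * id - a := by omega
  rw [e1, e2] at hp
  exact hp.2.2

-- reflecting the left point i - t to the mirror's right point 2*id - i + t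
lemma refl2 (l : List Char) (id i t : Nat) (hid : id < i) (h2 : i ≤ 2 * id) (hti : t ≤ i)
    (hlt : i < id + pvExpand l id 1) (hb : 2 * id - i + t < id + pvExpand l id 1) :
    l.getD (i - t) ' ' = l.getD (2 * id - i + t) ' ' := by
  rcases Nat.lt_trichotomy t (i - id) with hc | hc | hc
  · have h := refl1 l id (i - t) (by omega) (by omega)
    rw [show 2 * id - (i - t) = 2 * id - i + t from by omega] at h
    exact h
  · rw [show i - t = id from by omega, show 2 * id - i + t = id from by omega]
  · have h := refl1 l id (2 * id - i + t) (by omega) hb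
    rw [show 2 * id - (2 * id - i + t) = i - t from by omega] at h
    exact h.symm

-- core Manacher lemma: matches at i below min(Rj, mx-i) hold by mirroring around id
lemma mirror_match (l : List Char) (id i t : Nat)
    (hid : id < i) (hlt : i < id + pvExpand l id 1)
    (h1 : 1 ≤ t) (hRj : t < pvExpand l (2 * id - i) 1) (hmx : t < id + pvExpand l id 1 - i) :
    pvMatch l i t = true := by
  have hRid1 := expand_ge l id 1
  have hRidle := R_le_succ l id
  have hi2 : i ≤ 2 * id := by omega
  have hRjle := R_le_succ l (2 * id - i)
  have hn : id + pvExpand l id 1 ≤ l.length := by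
    have := R_pal l id (pvExpand l id 1 - 1) (by omega) (by omega)
    omega
  have hti : t ≤ i := by omega
  have e1 : l.getD (i + t) ' ' = l.getD (2 * id - i - t) ' ' := by
    have h := refl1 l id (i + t) (by omega) (by omega)
    rw [← Nat.sub_sub] at h
    exact h
  have e2 := refl2 l id i t hid hi2 hti hlt (by omega)
  have e3 := (R_pal l (2 * id - i) t h1 hRj).2.2
  simp only [pvMatch, Bool.and_eq_true, decide_eq_true_eq, beq_iff_eq]
  refine ⟨⟨by omega, by omega⟩, ?_⟩
  rw [e1, e2]
  exact e3.symm

-- if the mirror radius is short, i's radius equals it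
lemma caseB (l : List Char) (id i : Nat)
    (hid : id < i) (hlt : i < id + pvExpand l id 1)
    (h : pvExpand l (2 * id - i) 1 < id + pvExpand l id 1 - i) :
    pvExpand l i 1 = pvExpand l (2 * id - i) 1 := by
  have hRid1 := expand_ge l id 1
  have hRidle := R_le_succ l id
  have hi2 : i ≤ 2 * id := by omega
  have hRj1 := expand_ge l (2 * id - i) 1
  have hn : id + pvExpand l id 1 ≤ l.length := by
    have := R_pal l id (pvExpand l id 1 - 1) (by omega) (by omega)
    omega
  have hnot : pvMatch l i (pvExpand l (2 * id - i) 1) = false := by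
    by_contra hM
    have hM : pvMatch l i (pvExpand l (2 * id - i) 1) = true := by
      cases hh : pvMatch l i (pvExpand l (2 * id - i) 1) <;> simp_all
    simp only [pvMatch, Bool.and_eq_true, decide_eq_true_eq, beq_iff_eq] at hM
    obtain ⟨⟨hqi, hqn⟩, hqc⟩ := hM
    set q := pvExpand l (2 * id - i) 1 with hq
    have hqj : q ≤ 2 * id - i := by omega
    have e1 : l.getD (i + q) ' ' = l.getD (2 * id - i - q) ' ' := by
      have h := refl1 l id (i + q) (by omega) (by omega)
      rw [← Nat.sub_sub] at h
      exact h
    have e2 := refl2 l id i q hid hi2 (by omega) hlt (by omega)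
    have : pvMatch l (2 * id - i) q = true := by
      simp only [pvMatch, Bool.and_eq_true, decide_eq_true_eq, beq_iff_eq]
      refine ⟨⟨hqj, by omega⟩, ?_⟩
      rw [← e2, ← hqc, e1]
    have := expand_not_match l (2 * id - i) 1
    rw [← hq] at this
    simp [this] at *
  have hcongr := expand_congr l i (pvExpand l (2 * id - i) 1 - 1) 1
    (fun t h1 h2 => mirror_match l id i t hid hlt h1 (by omega) (by omega))
  rw [show 1 + (pvExpand l (2 * id - i) 1 - 1) = pvExpand l (2 * id - i) 1 from by omega] at hcongr
  rw [hcongr, pvExpand, dif_neg (by simp [hnot])]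

-- if the mirror radius is long, i's radius is clipped at the boundary
lemma caseC (l : List Char) (id i : Nat)
    (hid : id < i) (hlt : i < id + pvExpand l id 1)
    (h : id + pvExpand l id 1 - i < pvExpand l (2 * id - i) 1) :
    pvExpand l i 1 = id + pvExpand l id 1 - i := by
  have hRid1 := expand_ge l id 1
  have hRidle := R_le_succ l id
  have hi2 : i ≤ 2 * id := by omega
  have hRjle := R_le_succ l (2 * id - i)
  have hn : id + pvExpand l id 1 ≤ l.length := by
    have := R_pal l id (pvExpand l id 1 - 1) (by omega) (by omega)
    omega
  set t := id + pvExpand l id 1 - i with hts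
  have ht1 : 1 ≤ t := by omega
  have hnot : pvMatch l i t = false := by
    by_contra hM
    have hM : pvMatch l i t = true := by
      cases hh : pvMatch l i t <;> simp_all
    simp only [pvMatch, Bool.and_eq_true, decide_eq_true_eq, beq_iff_eq] at hM
    obtain ⟨⟨hqi, hqn⟩, hqc⟩ := hM
    have hRidid : pvExpand l id 1 ≤ id := by omega
    have e2 := refl2 l id i t hid hi2 (by omega) hlt (by omega)
    have e3 := (R_pal l (2 * id - i) t ht1 (by omega)).2.2
    have : pvMatch l id (pvExpand l id 1) = true := by
      simp only [pvMatch, Bool.and_eq_true, decide_eq_true_eq, beq_iff_eq]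
      refine ⟨⟨hRidid, by omega⟩, ?_⟩
      rw [show id + pvExpand l id 1 = i + t from by omega,
          show id - pvExpand l id 1 = 2 * id - i - t from by omega,
          hqc, e2]
      exact e3
    have h4 := expand_not_match l id 1
    simp [h4] at this
  have hcongr := expand_congr l i (t - 1) 1
    (fun u h1 h2 => mirror_match l id i u hid hlt h1 (by omega) (by omega))
  rw [show 1 + (t - 1) = t from by omega] at hcongr
  rw [hcongr, pvExpand, dif_neg (by simp [hnot])]

-- if they are equal, expanding from the mirror radius finishes the job
lemma caseD (l : List Char) (id i : Nat)
    (hid : id < i) (hlt : i < id + pvExpand l id 1)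
    (h : pvExpand l (2 * id - i) 1 = id + pvExpand l id 1 - i) :
    pvExpand l i (pvExpand l (2 * id - i) 1) = pvExpand l i 1 := by
  have hRj1 := expand_ge l (2 * id - i) 1
  have hcongr := expand_congr l i (pvExpand l (2 * id - i) 1 - 1) 1
    (fun t h1 h2 => mirror_match l id i t hid hlt h1 (by omega) (by omega))
  rw [show 1 + (pvExpand l (2 * id - i) 1 - 1) = pvExpand l (2 * id - i) 1 from by omega] at hcongr
  exact hcongr.symm

lemma step_inv (l : List Char) (i : Nat) (st : List Nat × Nat × Nat)
    (hi : 1 ≤ i) (hin : i < l.length) (h : pvInv l i st) :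
    pvInv l (i + 1) (pvStepA l st i) := by
  obtain ⟨p, id, mx⟩ := st
  obtain ⟨hlen, hp, hid, hmx⟩ := h
  simp only at hlen hp hid hmx
  have hkey : (if mx > i then
      if p.getD (2 * id - i) 0 ≠ mx - i then
        p.set i (min (p.getD (2 * id - i) 0) (mx - i))
      else
        p.set i (pvExpand l i (p.getD (2 * id - i) 0))
      else
        p.set i (pvExpand l i 1)) = p.set i (pvExpand l i 1) := by
    have hjlt : 2 * id - i < i := by omega
    split_ifs with h1 h2
    · rw [hp _ hjlt] at h2 ⊢
      rcases lt_or_gt_of_ne h2 with hc | hc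
      · rw [min_eq_left (le_of_lt hc), caseB l id i hid (by omega) (by omega)]
      · rw [min_eq_right (le_of_lt hc), caseC l id i hid (by omega) (by omega), hmx]
    · rw [hp _ hjlt] at h2 ⊢
      rw [caseD l id i hid (by omega) (by omega)]
    · rfl
  simp only [pvStepA, hkey]
  have hset : (p.set i (pvExpand l i 1)).getD i 0 = pvExpand l i 1 := by
    simp [List.getD_eq_getElem?_getD, hlen, hin]
  have hp' : ∀ j, j < i + 1 → (p.set i (pvExpand l i 1)).getD j 0 = pvExpand l j 1 := by
    intro j hj
    rcases Nat.lt_or_ge j i with hji | hji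
    · rw [List.getD_eq_getElem?_getD, List.getElem?_set_ne (by omega),
        ← List.getD_eq_getElem?_getD]
      exact hp j hji
    · have : j = i := by omega
      subst this
      exact hset
  rw [hset]
  split_ifs with hupd
  · exact ⟨by simpa using hlen, hp', Nat.lt_succ_self i, rfl⟩
  · exact ⟨by simpa using hlen, hp', Nat.lt_succ_of_lt hid, hmx⟩

lemma fold_inv (l : List Char) (cnt : Nat) : ∀ (i : Nat) (st : List Nat × Nat × Nat),
    1 ≤ i → i + cnt ≤ l.length → pvInv l i st →
    pvInv l (i + cnt) ((List.range' i cnt).foldl (pvStepA l) st) := by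
  induction cnt with
  | zero =>
    intro i st _ _ h
    simpa using h
  | succ cnt ih =>
    intro i st hi hle hinv
    rw [List.range'_succ, List.foldl_cons]
    have := ih (i + 1) (pvStepA l st i) (by omega) (by omega)
      (step_inv l i st hi (by omega) hinv)
    rw [show i + (cnt + 1) = i + 1 + cnt from by omega]
    exact this

lemma main_list (l : List Char) :
    (((List.range' 1 (l.length - 1)).foldl (pvStepA l) (List.replicate l.length 1, 0, 1)).1.map
        Int.ofNat) =
      (List.range l.length).map (fun i => Int.ofNat (pvExpand l i 1)) := by
  rcases Nat.eq_zero_or_pos l.length with h0 | h1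
  · rw [List.length_eq_zero_iff] at h0
    simp [h0]
  · have hinit : pvInv l 1 (List.replicate l.length 1, 0, 1) := by
      refine ⟨by simp, ?_, Nat.zero_lt_one, by simp [R_zero]⟩
      intro j hj
      have : j = 0 := by omega
      subst this
      rw [List.getD_eq_getElem?_getD, List.getElem?_replicate_of_lt (by omega)]
      simp [R_zero]
    have hfin := fold_inv l (l.length - 1) 1 _ (by omega) (by omega) hinit
    rw [show 1 + (l.length - 1) = l.length from by omega] at hfin
    obtain ⟨hlen, hp, -, -⟩ := hfin
    apply List.ext_getElem
    · simp [hlen]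
    · intro k hk1 hk2
      simp only [List.getElem_map, List.getElem_range]
      have hkn : k < l.length := by simpa using hk2
      have := hp k hkn
      rw [List.getD_eq_getElem?_getD, List.getElem?_eq_getElem (by omega)] at this
      simp only [Option.getD_some] at this
      rw [this]

-- bridging pvExpand with B's common-prefix count

lemma cpl_le_left (a : List Char) : ∀ b : List Char, pvCpl a b ≤ a.length := by
  induction a with
  | nil => intro b; simp [pvCpl]
  | cons x xs ih =>
    intro b
    cases b with
    | nil => simp [pvCpl]
    | cons y ys =>
      rw [pvCpl]
      have := ih ys
      split
      · simp only [List.length_cons]; omega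
      · simp

lemma cpl_le_right (a : List Char) : ∀ b : List Char, pvCpl a b ≤ b.length := by
  induction a with
  | nil => intro b; simp [pvCpl]
  | cons x xs ih =>
    intro b
    cases b with
    | nil => simp [pvCpl]
    | cons y ys =>
      rw [pvCpl]
      have := ih ys
      split
      · simp only [List.length_cons]; omega
      · simp

lemma cpl_match (a : List Char) : ∀ (b : List Char) (t : Nat), t < pvCpl a b →
    a.getD t ' ' = b.getD t ' ' := by
  induction a with
  | nil => intro b t ht; simp [pvCpl] at ht
  | cons x xs ih =>
    intro b t ht
    cases b with
    | nil => simp [pvCpl] at ht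
    | cons y ys =>
      rw [pvCpl] at ht
      split at ht
      · rename_i he
        cases t with
        | zero => simpa using he
        | succ t => simpa using ih ys t (by omega)
      · omega

lemma cpl_stop (a : List Char) : ∀ b : List Char, pvCpl a b < a.length → pvCpl a b < b.length →
    a.getD (pvCpl a b) ' ' ≠ b.getD (pvCpl a b) ' ' := by
  induction a with
  | nil => intro b h1 h2; simp at h1
  | cons x xs ih =>
    intro b h1 h2
    cases b with
    | nil => simp at h2
    | cons y ys =>
      by_cases he : x = y
      · rw [pvCpl, if_pos he] at h1 h2 ⊢
        simp only [List.length_cons] at h1 h2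
        simpa using ih ys (by omega) (by omega)
      · rw [pvCpl, if_neg he]
        simpa using he

-- index translation for the reversed left part and the right part
lemma takeRev_getD (l : List Char) (i t : Nat) (hi : i ≤ l.length) (ht : t < i) :
    ((l.take i).reverse).getD t ' ' = l.getD (i - 1 - t) ' ' := by
  rw [List.getD_eq_getElem?_getD, List.getD_eq_getElem?_getD]
  rw [List.getElem?_reverse (by simp [Nat.min_eq_left hi]; omega)]
  rw [List.length_take, Nat.min_eq_left hi]
  rw [List.getElem?_take_of_lt (by omega)]

lemma drop_getD (l : List Char) (i t : Nat) :
    (l.drop i).getD t ' ' = l.getD (i + t) ' ' := by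
  rw [List.getD_eq_getElem?_getD, List.getD_eq_getElem?_getD, List.getElem?_drop]

lemma expand_eq_cpl (l : List Char) (i : Nat) (hi : i < l.length) :
    pvExpand l i 1 = 1 + pvCpl (l.take i).reverse (l.drop (i + 1)) := by
  set m := pvCpl (l.take i).reverse (l.drop (i + 1)) with hm
  have hmA : m ≤ i := by
    have := cpl_le_left (l.take i).reverse (l.drop (i + 1))
    simpa [Nat.min_eq_left (le_of_lt hi)] using this
  have hmB : m ≤ l.length - (i + 1) := by
    have := cpl_le_right (l.take i).reverse (l.drop (i + 1))
    simpa using this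
  -- all offsets 1..m match
  have hmatch : ∀ t, 1 ≤ t → t < 1 + m → pvMatch l i t = true := by
    intro t h1 h2
    have hc := cpl_match (l.take i).reverse (l.drop (i + 1)) (t - 1) (by omega)
    rw [takeRev_getD l i (t - 1) (le_of_lt hi) (by omega), drop_getD] at hc
    rw [show i - 1 - (t - 1) = i - t from by omega,
        show i + 1 + (t - 1) = i + t from by omega] at hc
    simp only [pvMatch, Bool.and_eq_true, decide_eq_true_eq, beq_iff_eq]
    exact ⟨⟨by omega, by omega⟩, hc.symm⟩
  -- offset m+1 fails
  have hfail : pvMatch l i (1 + m) = false := by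
    rw [Bool.eq_false_iff]
    simp only [ne_eq, pvMatch, Bool.and_eq_true, decide_eq_true_eq, beq_iff_eq]
    rintro ⟨⟨hb1, hb2⟩, hb3⟩
    have hc := cpl_stop (l.take i).reverse (l.drop (i + 1))
      (by simp [Nat.min_eq_left (le_of_lt hi)]; omega) (by simp; omega)
    rw [← hm, takeRev_getD l i m (le_of_lt hi) (by omega), drop_getD] at hc
    rw [show i - 1 - m = i - (1 + m) from by omega,
        show i + 1 + m = i + (1 + m) from by omega] at hc
    exact hc hb3.symm
  have hcongr := expand_congr l i m 1 hmatch
  rw [hcongr, pvExpand, dif_neg (by simp [hfail])]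

-- ===== VERDICT (by name: the statement is the Claim_ definition above) =====
theorem Manacher2_spec : Claim_equal_Manacher2 := by
  intro s _
  show Manacher2 s = Manacher2_alt s
  unfold Manacher2 Manacher2_alt
  rw [main_list s.toList]
  exact List.map_congr_left (fun i hi =>
    by rw [expand_eq_cpl s.toList i (List.mem_range.mp hi)])
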